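-- pv_equiv track=rewrite | github.com/JEGHTNER/Algorithm | Python/Programmers_LV1/옹알이.py | check_babble
-- ===== SOURCE A (Python) =====
-- def check_babble(babble):
--     words = ["aya", "ye","woo","ma"]
--     tmp = ""
--     last = ""
--     for ch in babble:
--         tmp += ch
--         if tmp in words:
--             if last == tmp:
--                 return False
--             last = tmp
--             tmp = ""
--     if len(tmp) == 0:
--         return True
--     return False
-- ===== SOURCE B (Python) =====
-- def check_babble(babble):
--     words = ("aya", "ye", "woo", "ma")
--     tokens = []
--     i = 0
--     while i < len(babble):
--         for w in words:
--             if babble.startswith(w, i):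
--                 tokens.append(w)
--                 i += len(w)
--                 break
--         else:
--             return False
--     return all(a != b for a, b in zip(tokens, tokens[1:]))
-- ===== Notes on version B (the rewrite author's own statement) =====
-- stated objective: faster
-- what changed: B separates tokenization (greedy word-at-a-time prefix matching of the four words) from a second pass checking no two consecutive tokens are equal, instead of A's fused char-by-char buffer loop with per-character string concatenation.
import Mathlib
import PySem

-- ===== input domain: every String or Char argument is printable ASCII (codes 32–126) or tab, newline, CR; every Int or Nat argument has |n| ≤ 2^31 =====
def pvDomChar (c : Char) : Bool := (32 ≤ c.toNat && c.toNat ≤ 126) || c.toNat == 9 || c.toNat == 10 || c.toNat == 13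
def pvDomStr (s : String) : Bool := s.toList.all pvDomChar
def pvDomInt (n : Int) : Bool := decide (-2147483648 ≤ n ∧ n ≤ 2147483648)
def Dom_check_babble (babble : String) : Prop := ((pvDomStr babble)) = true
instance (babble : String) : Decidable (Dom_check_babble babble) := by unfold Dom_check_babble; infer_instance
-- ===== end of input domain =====

-- B tokenizes the whole string first (word-at-a-time prefix matching) and checks adjacent duplicates in a second pass; A fuses both into one char-by-char buffer loop. A timing run measured B faster (constant factor: no per-char string concatenation).

-- ===== PORT A =====
def wordsA : List (List Char) := [['a','y','a'], ['y','e'], ['w','o','o'], ['m','a']]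

def checkA_loop : List Char → List Char → List Char → Bool
  | [], tmp, _ => tmp.isEmpty
  | c :: rest, tmp, last =>
    let tmp' := tmp ++ [c]
    if tmp' ∈ wordsA then
      if last = tmp' then false
      else checkA_loop rest [] tmp'
    else checkA_loop rest tmp' last

def check_babble (babble : String) : Bool := checkA_loop babble.toList [] []

-- ===== PORT B =====
-- tokenizer: try each word as a prefix at the current position (startswith), word order as in Source B
def tokB : List Char → Option (List (List Char))
  | [] => some []
  | 'a' :: 'y' :: 'a' :: rest => (tokB rest).map (['a','y','a'] :: ·)
  | 'y' :: 'e' :: rest => (tokB rest).map (['y','e'] :: ·)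
  | 'w' :: 'o' :: 'o' :: rest => (tokB rest).map (['w','o','o'] :: ·)
  | 'm' :: 'a' :: rest => (tokB rest).map (['m','a'] :: ·)
  | _ :: _ => none

-- all(a != b for a, b in zip(tokens, tokens[1:]))
def noAdj (ts : List (List Char)) : Bool :=
  (ts.zip ts.tail).all (fun p => !(p.1 == p.2))

def check_babble_alt (babble : String) : Bool :=
  match tokB babble.toList with
  | none => false
  | some ts => noAdj ts

-- ===== PRECONDITION & SPEC =====
def Spec_check_babble (babble : String) (out : Bool) : Prop := out = check_babble_alt babble
instance (babble : String) (out : Bool) : Decidable (Spec_check_babble babble out) := by unfold Spec_check_babble; infer_instance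

-- ===== CLAIM (what is proved, stated in full; the proofs are below) =====
def Claim_equal_check_babble : Prop := ∀ (babble : String), Dom_check_babble babble → Spec_check_babble babble (check_babble babble)

-- ===== LEMMAS AND PROOFS =====

-- adjacency check threaded with a "previous token" accumulator (mirrors A's `last`)
def noAdjFrom : List Char → List (List Char) → Bool
  | _, [] => true
  | prev, t :: ts => if prev = t then false else noAdjFrom t ts

lemma stuck (cs : List Char) : ∀ tmp last, 3 ≤ tmp.length → checkA_loop cs tmp last = false := by
  induction cs with
  | nil =>
    intro tmp last h
    cases tmp with
    | nil => simp at h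
    | cons a t => simp [checkA_loop]
  | cons c rest ih =>
    intro tmp last h
    have hnot : tmp ++ [c] ∉ wordsA := by
      intro hmem
      simp only [wordsA, List.mem_cons, List.not_mem_nil, or_false] at hmem
      rcases hmem with h' | h' | h' | h' <;>
        (have := congrArg List.length h'; simp at this; omega)
    simp only [checkA_loop, if_neg hnot]
    exact ih _ _ (by simp; omega)

lemma tokB_ne_nil (cs : List Char) : ∀ ts, tokB cs = some ts → ∀ t ∈ ts, t ≠ [] := by
  fun_induction tokB cs <;> intro ts hts <;>
    simp_all [Option.map_eq_some_iff] <;>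
    obtain ⟨ts', h1, rfl⟩ := hts <;>
    simp_all

lemma noAdjFrom_eq (ts : List (List Char)) :
    ∀ t, noAdjFrom t ts = ((match ts with | [] => true | s :: _ => !(t == s)) && noAdj ts) := by
  induction ts with
  | nil => intro t; simp [noAdjFrom, noAdj]
  | cons s ts ih =>
    intro t
    cases ts with
    | nil => by_cases h : t = s <;> simp [noAdjFrom, noAdj, h]
    | cons u ts' =>
      have e1 : noAdjFrom t (s :: u :: ts') = if t = s then false else noAdjFrom s (u :: ts') := rfl
      rw [e1, ih s]
      by_cases h : t = s <;> simp [noAdj, h]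

lemma main_lemma (cs : List Char) : ∀ last, checkA_loop cs [] last =
    (match tokB cs with | none => false | some ts => noAdjFrom last ts) := by
  fun_induction tokB cs with
  | case1 => intro last; simp [checkA_loop, noAdjFrom]
  | case2 rest ih =>
    intro last
    simp only [checkA_loop, List.nil_append]
    rw [if_neg (by decide), if_neg (by decide), if_pos (by decide)]
    rw [ih]
    cases h : tokB rest <;> simp [noAdjFrom]
  | case3 rest ih =>
    intro last
    simp only [checkA_loop, List.nil_append]
    rw [if_neg (by decide), if_pos (by decide)]
    rw [ih]
    cases h : tokB rest <;> simp [noAdjFrom]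
  | case4 rest ih =>
    intro last
    simp only [checkA_loop, List.nil_append]
    rw [if_neg (by decide), if_neg (by decide), if_pos (by decide)]
    rw [ih]
    cases h : tokB rest <;> simp [noAdjFrom]
  | case5 rest ih =>
    intro last
    simp only [checkA_loop, List.nil_append]
    rw [if_neg (by decide), if_pos (by decide)]
    rw [ih]
    cases h : tokB rest <;> simp [noAdjFrom]
  | case6 head tail h1 h2 h3 h4 =>
    intro last
    have m1 : [head] ∉ wordsA := by simp [wordsA]
    cases tail with
    | nil => simp [checkA_loop, m1]
    | cons d tail2 =>
      have m2 : [head, d] ∉ wordsA := by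
        intro hm
        simp only [wordsA, List.mem_cons, List.not_mem_nil, or_false] at hm
        rcases hm with h' | h' | h' | h' <;> simp at h'
        · obtain ⟨rfl, rfl⟩ := h'; exact h2 tail2 rfl rfl
        · obtain ⟨rfl, rfl⟩ := h'; exact h4 tail2 rfl rfl
      simp only [checkA_loop, List.nil_append, if_neg m1, List.singleton_append, if_neg m2]
      cases tail2 with
      | nil => simp [checkA_loop]
      | cons e tail3 =>
        have m3 : [head, d, e] ∉ wordsA := by
          intro hm
          simp only [wordsA, List.mem_cons, List.not_mem_nil, or_false] at hm
          rcases hm with h' | h' | h' | h' <;> simp at h'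
          · obtain ⟨rfl, rfl, rfl⟩ := h'; exact h1 tail3 rfl rfl
          · obtain ⟨rfl, rfl, rfl⟩ := h'; exact h3 tail3 rfl rfl
        simp only [checkA_loop, List.cons_append, List.nil_append]
        rw [if_neg m3]
        exact stuck tail3 [head, d, e] last (by simp)

-- ===== VERDICT (by name: the statement is the Claim_ definition above) =====
theorem check_babble_spec : Claim_equal_check_babble := by
  intro babble _
  unfold Spec_check_babble check_babble check_babble_alt
  rw [main_lemma]
  cases h : tokB babble.toList with
  | none => rfl
  | some ts =>
    have hne := tokB_ne_nil _ _ h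
    show noAdjFrom [] ts = noAdj ts
    rw [noAdjFrom_eq]
    cases ts with
    | nil => simp [noAdj]
    | cons s ts' =>
      have : s ≠ [] := hne s (by simp)
      simp_all
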